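-- pv_equiv track=rewrite | github.com/estuarine-utokyo/oceanmesh-tools | src/oceanmesh_tools/mesh/boundary.py | classify_open_boundary_edges
-- ===== SOURCE A (Python) =====
-- from typing import Dict, Iterable, List, Sequence, Tuple
--
-- def classify_open_boundary_edges(
--     paths: List[List[int]],
--     ob_segments: List[List[int]],
-- ) -> Tuple[List[List[int]], List[List[int]]]:
--     """Split boundary paths into (open_paths, coast_paths) by edge membership.
--
--     Any consecutive edge (i,j) that appears in fort.14 open-boundary segments
--     (1-based node ids) is labeled as 'open'; others as 'coast'. Paths are split
--     when label changes to keep homogenous polylines.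
--     """
--     ob_edges: set[Tuple[int, int]] = set()
--     for seg in ob_segments:
--         if not seg:
--             continue
--         for a, b in zip(seg[:-1], seg[1:]):
--             i, j = int(a) - 1, int(b) - 1
--             if i == j:
--                 continue
--             t = (i, j) if i < j else (j, i)
--             ob_edges.add(t)
--     open_paths: List[List[int]] = []
--     coast_paths: List[List[int]] = []
--     for path in paths:
--         if len(path) < 2:
--             continue
--         cur_label = None
--         cur_seq: List[int] = [path[0]]
--         def commit(seq: List[int], lbl):
--             if len(seq) >= 2:
--                 (open_paths if lbl == 'open' else coast_paths).append(seq.copy())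
--         for u, v in zip(path[:-1], path[1:]):
--             e = (u, v) if u < v else (v, u)
--             lbl = 'open' if e in ob_edges else 'coast'
--             if cur_label is None:
--                 cur_label = lbl
--             if lbl != cur_label:
--                 commit(cur_seq, cur_label)
--                 cur_seq = [u, v]
--                 cur_label = lbl
--             else:
--                 cur_seq.append(v)
--         commit(cur_seq, cur_label)
--     return open_paths, coast_paths
-- ===== SOURCE B (Python) =====
-- from typing import List, Tuple
--
--
-- def classify_open_boundary_edges(
--     paths: List[List[int]],
--     ob_segments: List[List[int]],
-- ) -> Tuple[List[List[int]], List[List[int]]]: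
--     """Split boundary paths into (open_paths, coast_paths) by edge membership.
--
--     Re-implementation: per path, first build a table of edge labels, then
--     recursively peel off maximal runs of equal label, emitting node slices.
--     """
--     ob_edges = set()
--     for seg in ob_segments:
--         if not seg:
--             continue
--         for a, b in zip(seg[:-1], seg[1:]):
--             i, j = int(a) - 1, int(b) - 1
--             if i == j:
--                 continue
--             t = (i, j) if i < j else (j, i)
--             ob_edges.add(t)
--     open_paths: List[List[int]] = []
--     coast_paths: List[List[int]] = []
--     for path in paths:
--         labels = [(((u, v) if u < v else (v, u)) in ob_edges)
--                   for u, v in zip(path[:-1], path[1:])]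
--         for seg_nodes, is_open in _split_runs(path, labels):
--             (open_paths if is_open else coast_paths).append(seg_nodes)
--     return open_paths, coast_paths
--
--
-- def _split_runs(nodes: List[int], labels: List[bool]):
--     """Decompose into (node-slice, label) runs; consecutive runs share a node."""
--     if not labels:
--         return []
--     k = 1
--     while k < len(labels) and labels[k] == labels[0]:
--         k += 1
--     return [(nodes[:k + 1], labels[0])] + _split_runs(nodes[k:], labels[k:])
-- ===== Notes on version B (the rewrite author's own statement) =====
-- stated objective: alternative
-- what changed: Phase 2 replaces A's stateful cur_label/cur_seq accumulator with a per-path label table followed by a recursive run-splitter that slices whole maximal runs of equal label out of the node list.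
import Mathlib
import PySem

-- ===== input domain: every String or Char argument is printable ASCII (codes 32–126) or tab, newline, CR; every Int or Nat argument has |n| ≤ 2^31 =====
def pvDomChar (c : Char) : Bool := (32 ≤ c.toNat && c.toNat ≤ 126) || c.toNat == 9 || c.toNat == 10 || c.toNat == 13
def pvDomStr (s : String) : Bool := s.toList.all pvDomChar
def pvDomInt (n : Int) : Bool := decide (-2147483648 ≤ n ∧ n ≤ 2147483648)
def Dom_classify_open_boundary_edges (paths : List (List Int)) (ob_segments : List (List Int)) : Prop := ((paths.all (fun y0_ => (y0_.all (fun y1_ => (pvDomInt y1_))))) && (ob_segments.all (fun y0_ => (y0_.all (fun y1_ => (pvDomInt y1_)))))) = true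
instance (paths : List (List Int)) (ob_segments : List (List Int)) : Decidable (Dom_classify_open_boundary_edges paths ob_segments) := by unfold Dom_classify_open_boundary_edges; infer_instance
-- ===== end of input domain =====

-- B replaces A's stateful run accumulator by a label table plus a recursive run-splitter
-- over whole maximal runs (objective: alternative decomposition, same cost).

-- ===== PORT A =====

-- `(u, v) if u < v else (v, u)` (identical expression in both Pythons)
def pvNrm (u v : Int) : Int × Int := if u < v then (u, v) else (v, u)

-- phase 1 (textually identical in Source A and Source B): build the set of normalized open-boundary edges
def pvObEdges (ob_segments : List (List Int)) : PySem.Set (Int × Int) :=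
  ob_segments.foldl (fun s seg =>
    if seg.isEmpty then s
    else (seg.dropLast.zip (seg.drop 1)).foldl (fun s ab =>
      let i := ab.1 - 1
      let j := ab.2 - 1
      if i = j then s else PySem.Set.add s (pvNrm i j)) s)
    (PySem.Set.ofList [])

-- A's inner `commit` closure
def pvCommit (res : List (List Int) × List (List Int)) (seq : List Int) (lbl : Option String) :
    List (List Int) × List (List Int) :=
  if 2 ≤ seq.length then
    if lbl = some "open" then (res.1 ++ [seq], res.2) else (res.1, res.2 ++ [seq])
  else res

-- one iteration of A's `for u, v in zip(path[:-1], path[1:])` loop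
def pvStepA (E : PySem.Set (Int × Int))
    (st : (List (List Int) × List (List Int)) × Option String × List Int)
    (uv : Int × Int) : (List (List Int) × List (List Int)) × Option String × List Int :=
  let lbl : String := if PySem.Set.contains E (pvNrm uv.1 uv.2) then "open" else "coast"
  let cl : String := st.2.1.getD lbl   -- `if cur_label is None: cur_label = lbl`
  if lbl ≠ cl then
    (pvCommit st.1 st.2.2 (some cl), some lbl, [uv.1, uv.2])
  else
    (st.1, some cl, st.2.2 ++ [uv.2])

def classify_open_boundary_edges (paths : List (List Int)) (ob_segments : List (List Int)) :
    List (List Int) × List (List Int) :=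
  let E := pvObEdges ob_segments
  paths.foldl (fun acc path =>
    if path.length < 2 then acc
    else
      -- cur_seq starts as [path[0]]; path is nonempty here, so path[0] = headI
      let st := (path.dropLast.zip (path.drop 1)).foldl (pvStepA E) (acc, none, [path.headI])
      pvCommit st.1 st.2.2 st.2.1) ([], [])

-- ===== PORT B =====

-- Source B `while k < len(labels) and labels[k] == labels[0]` run counter (k = pvRunLen + 1)
def pvRunLen (c : Bool) : List Bool → Nat
  | [] => 0
  | b :: bs => if b = c then pvRunLen c bs + 1 else 0

-- Source B `_split_runs`; `nodes[:k+1]` = take (k+1), `nodes[k:]`/`labels[k:]` = drop k (k ≥ 0).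
-- Structural fuel (= initial labels length, enough since each call drops ≥ 1 label) only
-- makes the same recursion total for the kernel; it changes no computed value.
def pvSplitRunsGo : Nat → List Int → List Bool → List (List Int × Bool)
  | _, _, [] => []
  | 0, _, _ => []
  | fuel + 1, nodes, c :: ls =>
    let k := pvRunLen c ls + 1
    (nodes.take (k + 1), c) :: pvSplitRunsGo fuel (nodes.drop k) (ls.drop (k - 1))

def pvSplitRuns (nodes : List Int) (labels : List Bool) : List (List Int × Bool) :=
  pvSplitRunsGo labels.length nodes labels

-- Source B label-table comprehension
def pvLabels (E : PySem.Set (Int × Int)) (path : List Int) : List Bool :=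
  (path.dropLast.zip (path.drop 1)).map (fun uv => PySem.Set.contains E (pvNrm uv.1 uv.2))

def classify_open_boundary_edges_alt (paths : List (List Int)) (ob_segments : List (List Int)) :
    List (List Int) × List (List Int) :=
  let E := pvObEdges ob_segments
  paths.foldl (fun acc path =>
    (pvSplitRuns path (pvLabels E path)).foldl
      (fun acc r => if r.2 then (acc.1 ++ [r.1], acc.2) else (acc.1, acc.2 ++ [r.1])) acc)
    ([], [])

-- ===== PRECONDITION & SPEC =====
def Spec_classify_open_boundary_edges (paths : List (List Int)) (ob_segments : List (List Int)) (out : List (List Int) × List (List Int)) : Prop := out = classify_open_boundary_edges_alt paths ob_segments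
instance (paths : List (List Int)) (ob_segments : List (List Int)) (out : List (List Int) × List (List Int)) : Decidable (Spec_classify_open_boundary_edges paths ob_segments out) := by unfold Spec_classify_open_boundary_edges; infer_instance

-- ===== CLAIM (what is proved, stated in full; the proofs are below) =====
def Claim_equal_classify_open_boundary_edges : Prop := ∀ (paths : List (List Int)) (ob_segments : List (List Int)), Dom_classify_open_boundary_edges paths ob_segments → Spec_classify_open_boundary_edges paths ob_segments (classify_open_boundary_edges paths ob_segments)

-- ===== LEMMAS AND PROOFS =====

-- proof-side string of a Bool label
def pvStr (c : Bool) : String := if c then "open" else "coast"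

-- proof-side labels of the path u :: vs, one per consecutive edge
def pvLabs (E : PySem.Set (Int × Int)) : Int → List Int → List Bool
  | _, [] => []
  | u, v :: vs => PySem.Set.contains E (pvNrm u v) :: pvLabs E v vs

-- proof-side canonical run decomposition: remaining nodes vs, current node u,
-- current run label c, nodes of the current run so far seq (ending with u)
def pvRunsP (E : PySem.Set (Int × Int)) : List Int → Int → Bool → List Int → List (List Int × Bool)
  | [], _, c, seq => [(seq, c)]
  | v :: vs, u, c, seq =>
    if PySem.Set.contains E (pvNrm u v) = c then pvRunsP E vs v c (seq ++ [v])
    else (seq, c) :: pvRunsP E vs v (PySem.Set.contains E (pvNrm u v)) [u, v]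

def pvAppendRuns (acc : List (List Int) × List (List Int)) (runs : List (List Int × Bool)) :
    List (List Int) × List (List Int) :=
  runs.foldl (fun acc r => if r.2 then (acc.1 ++ [r.1], acc.2) else (acc.1, acc.2 ++ [r.1])) acc

-- continuation after a maximal run ending at node b
def pvCont (E : PySem.Set (Int × Int)) (b : Int) : List Int → List (List Int × Bool)
  | [] => []
  | w :: ws => pvRunsP E ws w (PySem.Set.contains E (pvNrm b w)) [b, w]

lemma pvZip_cons (u v : Int) (vs : List Int) :
    (u :: v :: vs).dropLast.zip ((u :: v :: vs).drop 1) =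
      (u, v) :: (v :: vs).dropLast.zip ((v :: vs).drop 1) := by
  cases vs <;> simp [List.dropLast]

lemma pvLabels_eq_labs (E : PySem.Set (Int × Int)) : ∀ (vs : List Int) (u : Int),
    pvLabels E (u :: vs) = pvLabs E u vs := by
  intro vs
  induction vs with
  | nil => intro u; simp [pvLabels, pvLabs]
  | cons v vs ih =>
    intro u
    have h := ih v
    unfold pvLabels at h ⊢
    rw [pvZip_cons, List.map_cons, h]
    simp [pvLabs]

lemma pvLabs_length (E : PySem.Set (Int × Int)) : ∀ (vs : List Int) (v : Int),
    (pvLabs E v vs).length = vs.length := by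
  intro vs; induction vs with
  | nil => intro v; simp [pvLabs]
  | cons w ws ih => intro v; simp [pvLabs, ih w]

lemma pvRunLen_le (c : Bool) : ∀ L : List Bool, pvRunLen c L ≤ L.length := by
  intro L; induction L with
  | nil => simp [pvRunLen]
  | cons b bs ih =>
    simp only [pvRunLen]
    split
    · simp; omega
    · simp

lemma pvLabs_drop (E : PySem.Set (Int × Int)) : ∀ (m : Nat) (vs : List Int) (v : Int),
    m ≤ vs.length →
    (pvLabs E v vs).drop m = pvLabs E ((v :: vs).getD m 0) (vs.drop m) := by
  intro m
  induction m with
  | zero => intro vs v _; simp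
  | succ m ih =>
    intro vs v h
    cases vs with
    | nil => simp at h
    | cons w ws =>
      simp only [pvLabs, List.drop_succ_cons, List.getD_cons_succ]
      exact ih ws w (by simpa using h)

lemma pvRunsP_char (E : PySem.Set (Int × Int)) : ∀ (vs : List Int) (v : Int) (c : Bool) (seq : List Int),
    pvRunsP E vs v c seq =
      (seq ++ vs.take (pvRunLen c (pvLabs E v vs)), c) ::
        pvCont E ((v :: vs).getD (pvRunLen c (pvLabs E v vs)) 0)
          (vs.drop (pvRunLen c (pvLabs E v vs))) := by
  intro vs
  induction vs with
  | nil => intro v c seq; simp [pvRunsP, pvLabs, pvRunLen, pvCont]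
  | cons w ws ih =>
    intro v c seq
    by_cases hl : PySem.Set.contains E (pvNrm v w) = c
    · simp only [pvRunsP, pvLabs, hl, pvRunLen]
      rw [ih w c (seq ++ [w])]
      simp
    · simp only [pvRunsP, pvLabs, hl, pvRunLen]
      simp [pvCont]

lemma pvDrop_cons_getD : ∀ (m : Nat) (vs : List Int) (v : Int), m ≤ vs.length →
    (v :: vs).drop m = (v :: vs).getD m 0 :: vs.drop m := by
  intro m
  induction m with
  | zero => intro vs v _; simp
  | succ m ih =>
    intro vs v h
    cases vs with
    | nil => simp at h
    | cons w ws =>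
      simp only [List.drop_succ_cons, List.getD_cons_succ]
      exact ih ws w (by simpa using h)

lemma pvSplitRunsGo_eq_runsP (E : PySem.Set (Int × Int)) : ∀ (fuel : Nat) (vs : List Int) (u v : Int),
    vs.length < fuel →
    pvSplitRunsGo fuel (u :: v :: vs) (pvLabs E u (v :: vs)) =
      pvRunsP E vs v (PySem.Set.contains E (pvNrm u v)) [u, v] := by
  intro fuel
  induction fuel with
  | zero => intro vs u v h; omega
  | succ n ih =>
    intro vs u v h
    set c := PySem.Set.contains E (pvNrm u v) with hc
    set m := pvRunLen c (pvLabs E v vs) with hm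
    have hmle : m ≤ vs.length := by
      rw [hm]; calc pvRunLen c (pvLabs E v vs) ≤ (pvLabs E v vs).length := pvRunLen_le _ _
        _ = vs.length := pvLabs_length E vs v
    have hlabs : pvLabs E u (v :: vs) = c :: pvLabs E v vs := by rw [hc]; rfl
    have hsr : pvSplitRunsGo (n + 1) (u :: v :: vs) (pvLabs E u (v :: vs)) =
        (([u, v] ++ vs.take m), c) ::
          pvSplitRunsGo n ((v :: vs).drop m) ((pvLabs E v vs).drop m) := by
      rw [hlabs]
      simp only [pvSplitRunsGo, ← hm]
      have h1 : (u :: v :: vs).take (m + 1 + 1) = [u, v] ++ vs.take m := by simp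
      have h2 : (u :: v :: vs).drop (m + 1) = (v :: vs).drop m := by simp
      have h3 : m + 1 - 1 = m := by omega
      rw [h1, h2, h3]
    rw [pvRunsP_char E vs v c [u, v], hsr]
    have hlabsdrop : (pvLabs E v vs).drop m = pvLabs E ((v :: vs).getD m 0) (vs.drop m) :=
      pvLabs_drop E m vs v hmle
    have hdropv : (v :: vs).drop m = (v :: vs).getD m 0 :: vs.drop m :=
      pvDrop_cons_getD m vs v hmle
    rw [hlabsdrop, hdropv]
    congr 1
    set b := (v :: vs).getD m 0 with hb
    rcases hdrop : vs.drop m with _ | ⟨w, ws⟩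
    · simp [pvLabs, pvSplitRunsGo, pvCont]
    · have hws : ws.length < n := by
        have := congrArg List.length hdrop
        simp at this; omega
      rw [ih ws b w hws]
      simp [pvCont]

lemma pvSplitRuns_eq_runsP (E : PySem.Set (Int × Int)) (vs : List Int) (u v : Int) :
    pvSplitRuns (u :: v :: vs) (pvLabs E u (v :: vs)) =
      pvRunsP E vs v (PySem.Set.contains E (pvNrm u v)) [u, v] := by
  unfold pvSplitRuns
  have hlen : (pvLabs E u (v :: vs)).length = vs.length + 1 := by
    rw [show pvLabs E u (v :: vs) = PySem.Set.contains E (pvNrm u v) :: pvLabs E v vs from rfl]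
    simp [pvLabs_length]
  rw [hlen]
  exact pvSplitRunsGo_eq_runsP E (vs.length + 1) vs u v (by omega)

lemma pvAppendRuns_cons (acc : List (List Int) × List (List Int)) (r : List Int × Bool)
    (rs : List (List Int × Bool)) :
    pvAppendRuns acc (r :: rs) =
      pvAppendRuns (if r.2 then (acc.1 ++ [r.1], acc.2) else (acc.1, acc.2 ++ [r.1])) rs := by
  simp [pvAppendRuns]

-- final `commit(cur_seq, cur_label)` applied to A's loop state
def pvFinish (st : (List (List Int) × List (List Int)) × Option String × List Int) :
    List (List Int) × List (List Int) :=
  pvCommit st.1 st.2.2 st.2.1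

lemma pvStepA_fold (E : PySem.Set (Int × Int)) : ∀ (vs : List Int) (v : Int) (cb : Bool)
    (seq : List Int) (acc : List (List Int) × List (List Int)), 2 ≤ seq.length →
    pvFinish (((v :: vs).dropLast.zip ((v :: vs).drop 1)).foldl (pvStepA E)
        (acc, some (pvStr cb), seq)) = pvAppendRuns acc (pvRunsP E vs v cb seq) := by
  intro vs
  induction vs with
  | nil =>
    intro v cb seq acc hseq
    show pvCommit acc seq (some (pvStr cb)) = pvAppendRuns acc (pvRunsP E [] v cb seq)
    cases cb <;> simp [pvCommit, hseq, pvRunsP, pvAppendRuns, pvStr]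
  | cons w ws ih =>
    intro v cb seq acc hseq
    rw [pvZip_cons]
    simp only [List.foldl_cons]
    have hstep : pvStepA E (acc, some (pvStr cb), seq) (v, w) =
        if PySem.Set.contains E (pvNrm v w) = cb then (acc, some (pvStr cb), seq ++ [w])
        else (pvCommit acc seq (some (pvStr cb)),
              some (pvStr (PySem.Set.contains E (pvNrm v w))), [v, w]) := by
      cases hE : PySem.Set.contains E (pvNrm v w)
      · have hmem : pvNrm v w ∉ E := by
          rw [← PySem.Set.contains_iff, hE]; simp
        cases cb <;> simp [pvStepA, hmem, pvStr]
      · have hmem : pvNrm v w ∈ E := by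
          rw [← PySem.Set.contains_iff]; exact hE
        cases cb <;> simp [pvStepA, hmem, pvStr]
    rw [hstep]
    by_cases h : PySem.Set.contains E (pvNrm v w) = cb
    · rw [if_pos h]
      rw [ih w cb (seq ++ [w]) acc (by simp; omega)]
      conv_rhs => rw [pvRunsP]
      rw [if_pos h]
    · rw [if_neg h]
      rw [ih w (PySem.Set.contains E (pvNrm v w)) [v, w] (pvCommit acc seq (some (pvStr cb)))
        (by simp)]
      conv_rhs => rw [pvRunsP]
      rw [if_neg h, pvAppendRuns_cons]
      have hcommit : pvCommit acc seq (some (pvStr cb)) =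
          if cb then (acc.1 ++ [seq], acc.2) else (acc.1, acc.2 ++ [seq]) := by
        cases cb <;> simp [pvCommit, hseq, pvStr]
      rw [hcommit]

-- per-path: A's loop body equals B's loop body, for every path and accumulator
lemma pvPath_eq (E : PySem.Set (Int × Int)) : ∀ (path : List Int)
    (acc : List (List Int) × List (List Int)),
    (if path.length < 2 then acc
     else
       let st := (path.dropLast.zip (path.drop 1)).foldl (pvStepA E) (acc, none, [path.headI])
       pvCommit st.1 st.2.2 st.2.1) =
    pvAppendRuns acc (pvSplitRuns path (pvLabels E path)) := by
  intro path acc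
  match path with
  | [] =>
    rw [if_pos (by simp)]
    show acc = pvAppendRuns acc (pvSplitRuns [] (pvLabels E []))
    rfl
  | [u] =>
    rw [if_pos (by simp)]
    show acc = pvAppendRuns acc (pvSplitRuns [u] (pvLabels E [u]))
    rfl
  | u :: v :: vs =>
    rw [if_neg (by simp)]
    show pvFinish (((u :: v :: vs).dropLast.zip ((u :: v :: vs).drop 1)).foldl (pvStepA E)
        (acc, none, [u])) = _
    rw [pvZip_cons]
    simp only [List.foldl_cons]
    have hfirst : pvStepA E (acc, none, [u]) (u, v) =
        (acc, some (pvStr (PySem.Set.contains E (pvNrm u v))), [u, v]) := by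
      cases hE : PySem.Set.contains E (pvNrm u v)
      · have hmem : pvNrm u v ∉ E := by
          rw [← PySem.Set.contains_iff, hE]; simp
        simp [pvStepA, hmem, pvStr]
      · have hmem : pvNrm u v ∈ E := by
          rw [← PySem.Set.contains_iff]; exact hE
        simp [pvStepA, hmem, pvStr]
    rw [hfirst]
    rw [pvStepA_fold E vs v (PySem.Set.contains E (pvNrm u v)) [u, v] acc (by simp)]
    rw [pvLabels_eq_labs E (v :: vs) u,
      pvSplitRuns_eq_runsP E vs u v]

lemma pvFold_eq (E : PySem.Set (Int × Int)) : ∀ (paths : List (List Int))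
    (acc : List (List Int) × List (List Int)),
    paths.foldl (fun acc path =>
      if path.length < 2 then acc
      else
        let st := (path.dropLast.zip (path.drop 1)).foldl (pvStepA E) (acc, none, [path.headI])
        pvCommit st.1 st.2.2 st.2.1) acc =
    paths.foldl (fun acc path =>
      (pvSplitRuns path (pvLabels E path)).foldl
        (fun acc r => if r.2 then (acc.1 ++ [r.1], acc.2) else (acc.1, acc.2 ++ [r.1])) acc) acc := by
  intro paths
  induction paths with
  | nil => intro acc; rfl
  | cons p ps ih =>
    intro acc
    simp only [List.foldl_cons]
    rw [pvPath_eq E p acc]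
    exact ih _

theorem pvClassify_eq (paths ob_segments : List (List Int)) :
    classify_open_boundary_edges paths ob_segments =
      classify_open_boundary_edges_alt paths ob_segments := by
  unfold classify_open_boundary_edges classify_open_boundary_edges_alt
  exact pvFold_eq (pvObEdges ob_segments) paths ([], [])

-- ===== VERDICT (by name: the statement is the Claim_ definition above) =====
theorem classify_open_boundary_edges_spec : Claim_equal_classify_open_boundary_edges := by
  intro paths ob_segments _
  unfold Spec_classify_open_boundary_edges
  exact pvClassify_eq paths ob_segments
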